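-- pv_equiv track=rewrite | github.com/AlexWesleyDev/Espace---D-veloppement---Code | BTS SIO 1/ALGO_PYTHON_MATH/Exercice_Matrice.py | tableau
-- ===== SOURCE A (Python) =====
-- def tableau(n):
--     T=[]
--     for i in range(n):
--         if(i%2==0):
--             T.append("V")
--         else:
--             T.append("F")
--     return T
-- ===== SOURCE B (Python) =====
-- def tableau(n):
--     return (["V", "F"] * ((n + 1) // 2))[:n]
-- ===== Notes on version B (the rewrite author's own statement) =====
-- stated objective: idiomatic
-- what changed: Replaces the index loop with a parity branch and incremental appends by building the repeated two-element pattern ["V","F"]*((n+1)//2) and truncating it with a slice [:n].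
import Mathlib
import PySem

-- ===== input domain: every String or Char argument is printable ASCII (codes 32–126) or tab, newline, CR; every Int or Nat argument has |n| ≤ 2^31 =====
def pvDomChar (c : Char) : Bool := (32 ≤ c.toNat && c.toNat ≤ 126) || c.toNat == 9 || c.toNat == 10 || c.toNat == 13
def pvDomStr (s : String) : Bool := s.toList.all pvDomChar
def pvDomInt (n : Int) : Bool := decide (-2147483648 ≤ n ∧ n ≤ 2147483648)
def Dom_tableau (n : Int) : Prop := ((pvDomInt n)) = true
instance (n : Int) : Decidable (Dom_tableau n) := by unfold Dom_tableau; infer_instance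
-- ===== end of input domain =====

-- B builds the repeated pattern ["V","F"]*((n+1)//2) and slices it to [:n] instead of looping with a parity branch (idiomatic).

-- ===== PORT A =====
def tableau (n : Int) : List String :=
  (PySem.List.pyRange 0 n 1).foldl
    (fun T i => T ++ [if PySem.Int.mod i 2 = 0 then "V" else "F"]) []

-- ===== PORT B =====
def tableau_alt (n : Int) : List String :=
  PySem.List.slice
    (List.flatten (List.replicate (PySem.Int.floordiv (n + 1) 2).toNat ["V", "F"]))
    none (some n)

-- ===== PRECONDITION & SPEC =====
def Spec_tableau (n : Int) (out : List String) : Prop := out = tableau_alt n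
instance (n : Int) (out : List String) : Decidable (Spec_tableau n out) := by unfold Spec_tableau; infer_instance

-- ===== CLAIM (what is proved, stated in full; the proofs are below) =====
def Claim_equal_tableau : Prop := ∀ (n : Int), Dom_tableau n → Spec_tableau n (tableau n)

-- ===== LEMMAS AND PROOFS =====

def pvPat (k : Nat) : String := if k % 2 = 0 then "V" else "F"

theorem pv_flatten_replicate (k : Nat) :
    List.flatten (List.replicate k ["V", "F"]) = (List.range (2 * k)).map pvPat := by
  induction k with
  | zero => simp
  | succ k ih =>
    rw [List.replicate_succ', List.flatten_append]
    have h2 : 2 * (k + 1) = (2 * k + 1) + 1 := by omega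
    rw [h2, List.range_succ, List.range_succ, ih]
    simp [pvPat, Nat.add_mod, Nat.mul_mod_right]

theorem pv_foldl_range (m : Nat) (acc : List String) :
    (PySem.List.pyRange 0 m 1).foldl
      (fun T i => T ++ [if PySem.Int.mod i 2 = 0 then "V" else "F"]) acc
    = acc ++ (List.range m).map pvPat := by
  induction m generalizing acc with
  | zero => simp [PySem.List.pyRange_one_eq_nil]
  | succ m ih =>
    rw [show ((m + 1 : Nat) : Int) = (m : Int) + 1 by push_cast; ring,
        PySem.List.pyRange_one_succ_right (by positivity), List.foldl_append, ih]
    have hm : PySem.Int.mod (m : Int) 2 = ((m % 2 : Nat) : Int) := by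
      simp only [PySem.Int.mod]; rw [Int.fmod_eq_emod]; omega
    have hif : (if PySem.Int.mod (m : Int) 2 = 0 then "V" else "F") = pvPat m := by
      by_cases hc : m % 2 = 0
      · rw [hm, if_pos (by omega)]; simp [pvPat, hc]
      · rw [hm, if_neg (by omega)]; simp [pvPat, hc]
    simp only [List.foldl_cons, List.foldl_nil]
    rw [hif, List.range_succ]
    simp

theorem pv_A_eq (n : Int) : tableau n = (List.range n.toNat).map pvPat := by
  unfold tableau
  rcases (by omega : n ≤ 0 ∨ 0 < n) with h | h
  · rw [PySem.List.pyRange_one_eq_nil (by omega)]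
    simp [Int.toNat_of_nonpos h]
  · obtain ⟨m, rfl⟩ : ∃ m : Nat, n = (m : Int) := ⟨n.toNat, by omega⟩
    rw [pv_foldl_range]; simp

theorem pv_B_eq (n : Int) : tableau_alt n = (List.range n.toNat).map pvPat := by
  unfold tableau_alt
  rcases (by omega : n ≤ 0 ∨ 0 < n) with h | h
  · have hk : (PySem.Int.floordiv (n + 1) 2).toNat = 0 := by
      have : PySem.Int.floordiv (n + 1) 2 ≤ 0 := by
        simp only [PySem.Int.floordiv]; rw [Int.fdiv_eq_ediv]; omega
      omega
    rw [hk]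
    simp [PySem.List.slice, Int.toNat_of_nonpos h]
  · rw [pv_flatten_replicate, PySem.List.slice_to _ (by omega : (0:Int) ≤ n),
        ← List.map_take, List.take_range]
    congr 1
    have hq : PySem.Int.floordiv (n + 1) 2 = (n + 1) / 2 := by
      simp only [PySem.Int.floordiv]; rw [Int.fdiv_eq_ediv]; simp
    congr 1
    omega

-- ===== VERDICT (by name: the statement is the Claim_ definition above) =====
theorem tableau_spec : Claim_equal_tableau := by
  intro n _
  unfold Spec_tableau
  rw [pv_A_eq, pv_B_eq]
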